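-- pv_equiv track=rewrite | github.com/tmnsky/aml-discounter | app/prescore.py | _dob_gap_exceeds
-- ===== SOURCE A (Python) =====
-- def _extract_years(dob_list: list[str]) -> list[int]:
--     """Extract 4-digit years from DOB strings (ISO dates, year-only, etc.)."""
--     years = []
--     for d in dob_list:
--         d = d.strip()
--         if not d:
--             continue
--         # Try to grab the year portion: "1985-03-12" -> 1985, "1985" -> 1985
--         candidate = d[:4]
--         try:
--             year = int(candidate)
--             if 1900 <= year <= 2100:
--                 years.append(year)
--         except ValueError:
--             continue
--     return years
--
-- def _dob_gap_exceeds(user_dobs: list[str], match_dobs: list[str], gap: int = 10) -> bool: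
--     """Check if the minimum year gap between any user DOB and match DOB exceeds threshold."""
--     user_years = _extract_years(user_dobs)
--     match_years = _extract_years(match_dobs)
--
--     if not user_years or not match_years:
--         return False  # Can't determine, don't auto-clear
--
--     min_gap = min(
--         abs(uy - my) for uy in user_years for my in match_years
--     )
--     return min_gap > gap
-- ===== SOURCE B (Python) =====
-- def _extract_years(dob_list):
--     """Extract 4-digit years from DOB strings (ISO dates, year-only, etc.)."""
--     years = []
--     for d in dob_list:
--         d = d.strip()
--         if not d:
--             continue
--         candidate = d[:4]
--         try:
--             year = int(candidate)
--             if 1900 <= year <= 2100: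
--                 years.append(year)
--         except ValueError:
--             continue
--     return years
--
-- def _dob_gap_exceeds(user_dobs, match_dobs, gap=10):
--     """Check if the minimum year gap between any user DOB and match DOB exceeds threshold."""
--     user_years = _extract_years(user_dobs)
--     match_years = sorted(_extract_years(match_dobs))
--     if not user_years or not match_years:
--         return False
--     n = len(match_years)
--     for uy in user_years:
--         # binary search: first index with match_years[i] >= uy - gap
--         lo, hi = 0, n
--         v = uy - gap
--         while lo < hi:
--             mid = (lo + hi) // 2
--             if match_years[mid] < v:
--                 lo = mid + 1
--             else:
--                 hi = mid
--         if lo < n and match_years[lo] <= uy + gap: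
--             return False  # some match year within gap of uy
--     return True
-- ===== Notes on version B (the rewrite author's own statement) =====
-- stated objective: alternative
-- what changed: Instead of taking the minimum over all pairwise year gaps, B sorts the match years once and for each user year binary-searches for a match year within the threshold window, returning early on a hit.
import Mathlib
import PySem

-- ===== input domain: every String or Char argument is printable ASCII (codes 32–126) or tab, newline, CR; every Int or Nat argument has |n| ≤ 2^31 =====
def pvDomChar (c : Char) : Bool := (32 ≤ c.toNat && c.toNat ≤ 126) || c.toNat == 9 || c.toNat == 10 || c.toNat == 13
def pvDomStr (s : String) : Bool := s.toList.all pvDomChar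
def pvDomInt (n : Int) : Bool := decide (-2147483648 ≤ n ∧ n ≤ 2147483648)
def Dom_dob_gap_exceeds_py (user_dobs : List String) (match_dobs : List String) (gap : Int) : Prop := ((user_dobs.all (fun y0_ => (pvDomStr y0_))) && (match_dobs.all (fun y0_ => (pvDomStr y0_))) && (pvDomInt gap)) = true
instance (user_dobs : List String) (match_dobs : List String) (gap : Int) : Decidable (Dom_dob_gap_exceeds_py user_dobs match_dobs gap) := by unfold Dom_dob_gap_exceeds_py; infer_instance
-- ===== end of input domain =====

-- ===== PORT A =====
-- B re-implements the check with sorted match years + per-user-year binary search instead of an n*m pairwise minimum.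
-- shared helper: literal transliteration of _extract_years (identical in Source A and Source B)
def extractYears (dob_list : List String) : List Int :=
  dob_list.foldl (fun years d0 =>
    let d := PySem.Chars.strip d0.toList
    if d = [] then years
    else
      let candidate := PySem.List.slice d none (some 4)
      match PySem.Int.ofChars? candidate with
      | some year => if 1900 ≤ year ∧ year ≤ 2100 then years ++ [year] else years
      | none => years) []

def dob_gap_exceeds_py (user_dobs : List String) (match_dobs : List String) (gap : Int) : Bool :=
  let user_years := extractYears user_dobs
  let match_years := extractYears match_dobs
  if user_years = [] ∨ match_years = [] then false
  else
    match PySem.List.min? (user_years.flatMap (fun uy => match_years.map (fun my => |uy - my|))) (fun x => x) with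
    | some min_gap => decide (gap < min_gap)
    | none => false  -- unreachable: both lists nonempty

-- ===== PORT B =====
-- while lo < hi: mid = (lo+hi)//2; if ys[mid] < v: lo = mid+1 else: hi = mid
def lowb (ys : List Int) (v : Int) (lo hi : Nat) : Nat :=
  if lo < hi then
    let mid := (lo + hi) / 2
    if ys.getD mid 0 < v then lowb ys v (mid + 1) hi else lowb ys v lo mid
  else lo
termination_by hi - lo
decreasing_by all_goals omega

-- the "for uy in user_years" loop with its early return
def scanUsers (ms : List Int) (gap : Int) : List Int → Bool
  | [] => true
  | uy :: rest =>
      let i := lowb ms (uy - gap) 0 ms.length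
      if i < ms.length ∧ ms.getD i 0 ≤ uy + gap then false
      else scanUsers ms gap rest

def dob_gap_exceeds_py_alt (user_dobs : List String) (match_dobs : List String) (gap : Int) : Bool :=
  let user_years := extractYears user_dobs
  let match_years := PySem.List.sorted (extractYears match_dobs) (fun x => x) false
  if user_years = [] ∨ match_years = [] then false
  else scanUsers match_years gap user_years

-- ===== PRECONDITION & SPEC =====
def Spec_dob_gap_exceeds_py (user_dobs : List String) (match_dobs : List String) (gap : Int) (out : Bool) : Prop := out = dob_gap_exceeds_py_alt user_dobs match_dobs gap
instance (user_dobs : List String) (match_dobs : List String) (gap : Int) (out : Bool) : Decidable (Spec_dob_gap_exceeds_py user_dobs match_dobs gap out) := by unfold Spec_dob_gap_exceeds_py; infer_instance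

-- ===== CLAIM (what is proved, stated in full; the proofs are below) =====
def Claim_equal_dob_gap_exceeds_py : Prop := ∀ (user_dobs : List String) (match_dobs : List String) (gap : Int), Dom_dob_gap_exceeds_py user_dobs match_dobs gap → Spec_dob_gap_exceeds_py user_dobs match_dobs gap (dob_gap_exceeds_py user_dobs match_dobs gap)

-- ===== LEMMAS AND PROOFS =====

-- the binary search finds the first index whose element is ≥ v, on a monotone list
theorem lowb_spec (ys : List Int) (v : Int)
    (hmono : ∀ p q : Nat, p ≤ q → q < ys.length → ys.getD p 0 ≤ ys.getD q 0)
    (lo hi : Nat) :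
    lo ≤ hi → hi ≤ ys.length →
    (∀ i < lo, ys.getD i 0 < v) → (∀ i, hi ≤ i → i < ys.length → v ≤ ys.getD i 0) →
    lo ≤ lowb ys v lo hi ∧ lowb ys v lo hi ≤ hi ∧
      (∀ i < lowb ys v lo hi, ys.getD i 0 < v) ∧
      (∀ i, lowb ys v lo hi ≤ i → i < ys.length → v ≤ ys.getD i 0) := by
  fun_induction lowb ys v lo hi with
  | case1 lo hi hlt mid hmidlt ih =>
      intro h1 h2 hlo hhi
      have hmid : mid = (lo + hi) / 2 := rfl
      have hmlen : mid < ys.length := by omega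
      have hlo' : ∀ i < mid + 1, ys.getD i 0 < v := fun i hi2 =>
        lt_of_le_of_lt (hmono i mid (by omega) hmlen) hmidlt
      obtain ⟨a, b, c, d⟩ := ih (by omega) h2 hlo' hhi
      exact ⟨by omega, b, c, d⟩
  | case2 lo hi hlt mid hmidge ih =>
      intro h1 h2 hlo hhi
      have hmid : mid = (lo + hi) / 2 := rfl
      have hhi' : ∀ i, mid ≤ i → i < ys.length → v ≤ ys.getD i 0 := fun i h3 h4 =>
        le_trans (not_lt.1 hmidge) (hmono mid i h3 h4)
      obtain ⟨a, b, c, d⟩ := ih (by omega) (by omega) hlo hhi'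
      exact ⟨a, by omega, c, d⟩
  | case3 lo hi hge =>
      intro h1 h2 hlo hhi
      exact ⟨le_refl lo, h1, hlo, fun i h3 h4 => hhi i (by omega) h4⟩

-- the hit test of B's inner search decides existence of an element of l in [v, w]
theorem hit_iff (l : List Int) (v w : Int) :
    (lowb (PySem.List.sorted l (fun x => x) false) v 0 (PySem.List.sorted l (fun x => x) false).length < (PySem.List.sorted l (fun x => x) false).length ∧
      (PySem.List.sorted l (fun x => x) false).getD (lowb (PySem.List.sorted l (fun x => x) false) v 0 (PySem.List.sorted l (fun x => x) false).length) 0 ≤ w)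
    ↔ ∃ b ∈ l, v ≤ b ∧ b ≤ w := by
  set ys := PySem.List.sorted l (fun x => x) false with hys
  have hmono : ∀ p q : Nat, p ≤ q → q < ys.length → ys.getD p 0 ≤ ys.getD q 0 := by
    intro p q hpq hq
    rw [List.getD_eq_getElem ys 0 (by omega), List.getD_eq_getElem ys 0 hq]
    exact PySem.List.sorted_id_getElem_mono l hpq hq
  obtain ⟨h1, h2, h3, h4⟩ := lowb_spec ys v hmono 0 ys.length (by omega) le_rfl (by omega) (by omega)
  constructor
  · rintro ⟨hr, hw⟩
    refine ⟨ys.getD (lowb ys v 0 ys.length) 0, ?_, h4 _ le_rfl hr, hw⟩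
    rw [← PySem.List.mem_sorted (key := fun x => x) (rev := false), ← hys,
        List.getD_eq_getElem ys 0 hr]
    exact List.getElem_mem hr
  · rintro ⟨b, hb, hvb, hbw⟩
    have hb' : b ∈ ys := by rw [hys, PySem.List.mem_sorted]; exact hb
    obtain ⟨i, hi, hbi⟩ := List.getElem_of_mem hb'
    have hri : lowb ys v 0 ys.length ≤ i := by
      by_contra hc
      rw [not_le] at hc
      have := h3 i hc
      rw [List.getD_eq_getElem ys 0 hi, hbi] at this
      omega
    have hrlen : lowb ys v 0 ys.length < ys.length := lt_of_le_of_lt hri hi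
    refine ⟨hrlen, ?_⟩
    calc ys.getD (lowb ys v 0 ys.length) 0 ≤ ys.getD i 0 := hmono _ i hri hi
      _ = b := by rw [List.getD_eq_getElem ys 0 hi, hbi]
      _ ≤ w := hbw

theorem scanUsers_eq_all (ms : List Int) (gap : Int) (l : List Int) :
    scanUsers ms gap l = l.all (fun uy => !(decide (lowb ms (uy - gap) 0 ms.length < ms.length ∧ ms.getD (lowb ms (uy - gap) 0 ms.length) 0 ≤ uy + gap))) := by
  induction l with
  | nil => rfl
  | cons uy rest ih =>
      simp only [scanUsers, List.all_cons, ih]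
      by_cases h : (lowb ms (uy - gap) 0 ms.length < ms.length ∧ ms.getD (lowb ms (uy - gap) 0 ms.length) 0 ≤ uy + gap)
      · rw [if_pos h, decide_eq_true h]; rfl
      · rw [if_neg h, decide_eq_false h]; rfl

theorem min_flat_gt (U M : List Int) (gap : Int) (hU : U ≠ []) (hM : M ≠ []) :
    (match PySem.List.min? (U.flatMap (fun uy => M.map (fun my => |uy - my|))) (fun x => x) with
      | some min_gap => decide (gap < min_gap)
      | none => false)
    = decide (∀ a ∈ U, ∀ b ∈ M, gap < |a - b|) := by
  obtain ⟨a0, U', rfl⟩ := List.exists_cons_of_ne_nil hU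
  obtain ⟨b0, M', rfl⟩ := List.exists_cons_of_ne_nil hM
  have hne : ((a0 :: U').flatMap (fun uy => (b0 :: M').map (fun my => |uy - my|))) ≠ [] := by
    simp [List.flatMap]
  cases hmin : PySem.List.min? ((a0 :: U').flatMap (fun uy => (b0 :: M').map (fun my => |uy - my|))) (fun x => x) with
  | none => exact absurd ((PySem.List.min?_eq_none_iff _ _).1 hmin) hne
  | some mg =>
      have hmem := PySem.List.min?_mem hmin
      have hisMin := PySem.List.min?_isMin hmin
      simp only [decide_eq_decide]
      constructor
      · intro hgt a ha b hb
        refine lt_of_lt_of_le hgt (hisMin _ ?_)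
        simp only [List.mem_flatMap, List.mem_map]
        exact ⟨a, ha, b, hb, rfl⟩
      · intro hall
        obtain ⟨a, ha, b, hb, hab⟩ := by
          simpa only [List.mem_flatMap, List.mem_map] using hmem
        rw [← hab]
        exact hall a ha b hb

-- ===== VERDICT (by name: the statement is the Claim_ definition above) =====
theorem dob_gap_exceeds_py_spec : Claim_equal_dob_gap_exceeds_py := by
  intro u m gap _
  unfold Spec_dob_gap_exceeds_py dob_gap_exceeds_py dob_gap_exceeds_py_alt
  by_cases hU : extractYears u = []
  · simp [hU]
  by_cases hM : extractYears m = []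
  · simp [hM, PySem.List.sorted_eq_nil_iff]
  · rw [if_neg (by tauto), if_neg (by simp [PySem.List.sorted_eq_nil_iff]; tauto)]
    rw [min_flat_gt _ _ gap hU hM, scanUsers_eq_all]
    rw [Bool.eq_iff_iff]
    simp only [List.all_eq_true, Bool.not_eq_eq_eq_not, Bool.not_true, decide_eq_false_iff_not,
      decide_eq_true_eq]
    constructor
    · intro h uy hu
      rw [hit_iff (extractYears m) (uy - gap) (uy + gap)]
      rintro ⟨b, hb, hvb, hbw⟩
      have := h uy hu b hb
      rcases abs_cases (uy - b) with ⟨he, _⟩ | ⟨he, _⟩ <;> omega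
    · intro h a ha b hb
      have := h a ha
      rw [hit_iff (extractYears m) (a - gap) (a + gap)] at this
      by_contra hc
      rw [not_lt] at hc
      exact this ⟨b, hb, by rcases abs_cases (a - b) with ⟨he, _⟩ | ⟨he, _⟩ <;> omega⟩
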